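-- pv_equiv track=rewrite | github.com/gaofeng21cn/med-autoscience | src/med_autoscience/controllers/data_assets.py | _latest_versions_by_family
-- ===== SOURCE A (Python) =====
-- def _latest_versions_by_family(releases: list[dict[str, object]]) -> dict[str, str]:
--     latest: dict[str, str] = {}
--     for release in releases:
--         family_id = str(release["family_id"])
--         version_id = str(release["version_id"])
--         if family_id not in latest or version_id > latest[family_id]:
--             latest[family_id] = version_id
--     return latest
-- ===== SOURCE B (Python) =====
-- from collections import defaultdict
--
-- def _latest_versions_by_family(releases: list[dict[str, object]]) -> dict[str, str]:
--     groups: dict[str, list[str]] = defaultdict(list)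
--     for release in releases:
--         groups[str(release["family_id"])].append(str(release["version_id"]))
--     return {family_id: max(versions) for family_id, versions in groups.items()}
-- ===== Notes on version B (the rewrite author's own statement) =====
-- stated objective: alternative
-- what changed: B replaces A's single-pass running-maximum dict with a two-phase group-then-reduce: it first builds a dict of version lists per family with defaultdict(list), then maps each family to max() of its list.
import Mathlib
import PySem

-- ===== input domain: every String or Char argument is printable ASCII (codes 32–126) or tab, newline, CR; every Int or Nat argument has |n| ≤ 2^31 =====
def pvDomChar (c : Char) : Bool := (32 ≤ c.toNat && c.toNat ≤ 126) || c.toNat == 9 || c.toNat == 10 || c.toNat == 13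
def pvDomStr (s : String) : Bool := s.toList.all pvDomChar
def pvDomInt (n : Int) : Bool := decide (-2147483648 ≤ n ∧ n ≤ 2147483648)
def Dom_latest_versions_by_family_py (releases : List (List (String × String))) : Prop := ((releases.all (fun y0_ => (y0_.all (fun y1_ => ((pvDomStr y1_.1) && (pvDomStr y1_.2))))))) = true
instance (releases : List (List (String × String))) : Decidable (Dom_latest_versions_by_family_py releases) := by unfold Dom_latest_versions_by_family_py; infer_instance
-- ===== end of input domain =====

-- B replaces A's single-pass running-maximum dict by a group-then-reduce: first a dict of version
-- lists per family, then max() of each list (objective: alternative decomposition, same cost).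

-- ===== PORT A =====
-- release["key"]: first-match lookup in the association list (Pre_ guarantees the key is present,
-- so the "" default is never the result Python would have raised on); shared by both ports.
def pvLookup (r : List (String × String)) (k : String) : String :=
  (PySem.Dict.mk r).getD k ""

def latest_versions_by_family_py (releases : List (List (String × String))) : List (String × String) :=
  (releases.foldl (fun latest release =>
      let family_id := pvLookup release "family_id"
      let version_id := pvLookup release "version_id"
      if !(latest.contains family_id) || decide (latest.getD family_id "" < version_id)
      then latest.insert family_id version_id
      else latest)
    PySem.Dict.empty).items

-- ===== PORT B =====
def latest_versions_by_family_py_alt (releases : List (List (String × String))) : List (String × String) :=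
  let groups : PySem.Dict String (List String) :=
    releases.foldl (fun g release =>
      g.modify (pvLookup release "family_id") [] (fun vs => vs ++ [pvLookup release "version_id"]))
      PySem.Dict.empty
  groups.items.map (fun p => (p.1, (PySem.List.max? p.2 (fun x => x)).getD ""))

-- ===== PRECONDITION & SPEC =====
-- Pre_ excludes exactly the releases lacking a "family_id" or "version_id" key, on which A raises KeyError.
def Pre_latest_versions_by_family_py (releases : List (List (String × String))) : Prop :=
  (releases.all (fun r => (PySem.Dict.mk r).contains "family_id" && (PySem.Dict.mk r).contains "version_id")) = true
instance (releases : List (List (String × String))) : Decidable (Pre_latest_versions_by_family_py releases) := by unfold Pre_latest_versions_by_family_py; infer_instance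

def pvWitness_latest_versions_by_family_py : (List (List (String × String))) :=
  [[("family_id", "fam1"), ("version_id", "v1")], [("family_id", "fam1"), ("version_id", "v2")]]

def Spec_latest_versions_by_family_py (releases : List (List (String × String))) (out : List (String × String)) : Prop := out = latest_versions_by_family_py_alt releases
instance (releases : List (List (String × String))) (out : List (String × String)) : Decidable (Spec_latest_versions_by_family_py releases out) := by unfold Spec_latest_versions_by_family_py; infer_instance

-- ===== CLAIM (what is proved, stated in full; the proofs are below) =====
def Claim_equal_latest_versions_by_family_py : Prop := ∀ (releases : List (List (String × String))), Dom_latest_versions_by_family_py releases → Pre_latest_versions_by_family_py releases → Spec_latest_versions_by_family_py releases (latest_versions_by_family_py releases)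

-- ===== LEMMAS AND PROOFS =====

-- A's loop body, on the (family_id, version_id) pair extracted from a release.
def pvStepA (d : PySem.Dict String String) (p : String × String) : PySem.Dict String String :=
  if !(d.contains p.1) || decide (d.getD p.1 "" < p.2) then d.insert p.1 p.2 else d

-- max(vs) as B computes it.
def pvMax (vs : List String) : String := (PySem.List.max? vs (fun x => x)).getD ""

theorem pvMax_singleton (v : String) : pvMax [v] = v := by
  simp [pvMax, PySem.List.max?_id_cons]

theorem pvMax_append (vs : List String) (hne : vs ≠ []) (v : String) :
    pvMax (vs ++ [v]) = max (pvMax vs) v := by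
  cases vs with
  | nil => exact absurd rfl hne
  | cons w t => simp [pvMax, PySem.List.max?_id_cons, List.foldl_append]

-- the per-family version lists of a pair list
def pvVers (ps : List (String × String)) (k : String) : List String :=
  (ps.filter (fun p => p.1 == k)).map (fun p => p.2)

theorem pvVers_ne_nil (ps : List (String × String)) (k : String)
    (h : k ∈ ps.map (fun p => p.1)) : pvVers ps k ≠ [] := by
  obtain ⟨p, hp, hk⟩ := List.mem_map.mp h
  simp only [pvVers, ne_eq, List.map_eq_nil_iff, List.filter_eq_nil_iff]
  intro hall
  exact (hall p hp) (by simp [hk])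

theorem pvVers_append (ps : List (String × String)) (p : String × String) (k : String) :
    pvVers (ps ++ [p]) k = pvVers ps k ++ (if p.1 = k then [p.2] else []) := by
  simp only [pvVers, List.filter_append, List.map_append]
  by_cases h : p.1 = k <;> simp [h]

-- characterisation of A's fold: its items are, per first-occurrence family key, the max version
theorem pvFoldA_items (ps : List (String × String)) :
    (ps.foldl pvStepA PySem.Dict.empty).items
      = (PySem.Set.ofList (ps.map (fun p => p.1))).map (fun k => (k, pvMax (pvVers ps k))) := by
  induction ps using List.reverseRecOn with
  | nil => simp [PySem.Dict.empty, PySem.Set.ofList_nil]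
  | append_singleton xs p ih =>
    have hkeys : (xs.foldl pvStepA PySem.Dict.empty).keys
        = PySem.Set.ofList (xs.map (fun p => p.1)) := by
      simp [PySem.Dict.keys, ih, List.map_map, Function.comp_def]
    have hnd : (xs.foldl pvStepA PySem.Dict.empty).keys.Nodup := by
      rw [hkeys]; exact PySem.Set.nodup_ofList _
    rw [List.foldl_append, List.foldl_cons, List.foldl_nil, List.map_append,
      List.map_singleton, PySem.Set.ofList_append_singleton]
    by_cases hmem : p.1 ∈ PySem.Set.ofList (xs.map (fun p => p.1))
    · -- the family is already present
      have hc : (xs.foldl pvStepA PySem.Dict.empty).contains p.1 = true := by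
        rw [PySem.Dict.contains_iff_mem_keys, hkeys]; exact hmem
      have hget : (xs.foldl pvStepA PySem.Dict.empty).getD p.1 "" = pvMax (pvVers xs p.1) := by
        apply PySem.Dict.getD_of_mem_items _ _ hnd
        rw [ih]
        exact List.mem_map.mpr ⟨p.1, hmem, rfl⟩
      have hvs := pvVers_ne_nil xs p.1 (by simpa [PySem.Set.mem_ofList] using hmem)
      rw [PySem.Set.add_of_mem hmem]
      by_cases hlt : (xs.foldl pvStepA PySem.Dict.empty).getD p.1 "" < p.2
      · rw [show pvStepA (xs.foldl pvStepA PySem.Dict.empty) p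
            = (xs.foldl pvStepA PySem.Dict.empty).insert p.1 p.2 by
          simp [pvStepA, hlt]]
        rw [PySem.Dict.items_insert_of_contains _ _ hc, ih, List.map_map]
        apply List.map_congr_left
        intro k _
        by_cases hk : k = p.1
        · subst hk
          simp only [Function.comp_apply, beq_self_eq_true, if_pos]
          rw [pvVers_append, if_pos rfl, pvMax_append _ hvs]
          rw [hget] at hlt
          simp [max_eq_right (le_of_lt hlt)]
        · simp only [Function.comp_apply, beq_iff_eq, hk, if_false]
          rw [pvVers_append, if_neg (fun h => hk h.symm)]
          simp
      · rw [show pvStepA (xs.foldl pvStepA PySem.Dict.empty) p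
            = xs.foldl pvStepA PySem.Dict.empty by
          simp [pvStepA, hlt, hc]]
        rw [ih]
        apply List.map_congr_left
        intro k _
        by_cases hk : k = p.1
        · subst hk
          rw [pvVers_append, if_pos rfl, pvMax_append _ hvs]
          rw [hget] at hlt
          rw [← hget, max_eq_left (not_lt.mp (hget ▸ hlt)), hget]
        · rw [pvVers_append, if_neg (fun h => hk h.symm)]
          simp
    · -- a new family: appended at the end on both sides
      have hc : (xs.foldl pvStepA PySem.Dict.empty).contains p.1 = false := by
        rw [← Bool.not_eq_true, PySem.Dict.contains_iff_mem_keys, hkeys]; exact hmem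
      rw [show pvStepA (xs.foldl pvStepA PySem.Dict.empty) p
          = (xs.foldl pvStepA PySem.Dict.empty).insert p.1 p.2 by
        simp [pvStepA, hc]]
      rw [PySem.Dict.items_insert_of_not_contains _ _ hc, ih,
        PySem.Set.add_of_not_mem hmem, List.map_append, List.map_singleton]
      congr 1
      · apply List.map_congr_left
        intro k hk
        have hkne : p.1 ≠ k := fun h => hmem (h ▸ hk)
        rw [pvVers_append, if_neg hkne]
        simp
      · have hnil : pvVers xs p.1 = [] := by
          simp only [pvVers, List.map_eq_nil_iff, List.filter_eq_nil_iff]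
          intro q hq hqk
          exact hmem (by
            rw [PySem.Set.mem_ofList]
            exact List.mem_map.mpr ⟨q, hq, by simpa using hqk⟩)
        rw [pvVers_append, if_pos rfl, hnil, List.nil_append, pvMax_singleton]

-- A's port, re-expressed as the fold over extracted key/version pairs
theorem pvA_eq (releases : List (List (String × String))) :
    latest_versions_by_family_py releases
      = ((releases.map (fun r => (pvLookup r "family_id", pvLookup r "version_id"))).foldl
          pvStepA PySem.Dict.empty).items := by
  simp only [latest_versions_by_family_py, List.foldl_map]
  rfl

-- B's port, re-expressed through the grouping lemmas
theorem pvB_eq (releases : List (List (String × String))) :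
    latest_versions_by_family_py_alt releases
      = (PySem.Set.ofList ((releases.map (fun r => (pvLookup r "family_id", pvLookup r "version_id"))).map (fun p => p.1))).map
          (fun k => (k, pvMax (pvVers (releases.map (fun r => (pvLookup r "family_id", pvLookup r "version_id"))) k))) := by
  set ps := releases.map (fun r => (pvLookup r "family_id", pvLookup r "version_id")) with hps
  have hfold : (releases.foldl (fun g release =>
        g.modify (pvLookup release "family_id") [] (fun vs => vs ++ [pvLookup release "version_id"]))
        PySem.Dict.empty)
      = ps.foldl (fun d p => d.modify p.1 [] (fun vs => vs ++ [p.2])) PySem.Dict.empty := by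
    rw [hps, List.foldl_map]
  have hkeys : (ps.foldl (fun d p => d.modify p.1 [] (fun vs => vs ++ [p.2])) PySem.Dict.empty).keys
      = PySem.Set.ofList (ps.map (fun p => p.1)) := by
    rw [PySem.Dict.keys_foldl_modify_key ps (fun p => p.1) [] (fun _ p => (fun vs => vs ++ [p.2]))]
    simp [PySem.Set.update_nil_left]
  have hnd : (ps.foldl (fun d p => d.modify p.1 [] (fun vs => vs ++ [p.2])) PySem.Dict.empty).keys.Nodup := by
    rw [hkeys]; exact PySem.Set.nodup_ofList _
  simp only [latest_versions_by_family_py_alt, hfold]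
  rw [PySem.Dict.items_eq_map_keys _ hnd [], hkeys, List.map_map]
  apply List.map_congr_left
  intro k _
  simp only [Function.comp_apply]
  rw [PySem.Dict.getD_foldl_modify_append]
  simp [pvMax, pvVers]

-- ===== VERDICT (by name: the statement is the Claim_ definition above) =====
theorem latest_versions_by_family_py_spec : Claim_equal_latest_versions_by_family_py := by
  intro releases _ _
  unfold Spec_latest_versions_by_family_py
  rw [pvA_eq, pvFoldA_items, pvB_eq]
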